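-- pv_equiv track=rewrite | github.com/cslltian/deepfake-detection | model/classify.py | smooth_predictions
-- ===== SOURCE A (Python) =====
-- def smooth_predictions(pred):
--     out_pred = []
--     for i in range(len(pred)):
--         prev_lbl = pred[i - 1] if i > 0 else -1
--         next_lbl = pred[i + 1] if i < len(pred) - 1 else -1
--         if pred[i] == 1 and prev_lbl == 0 and next_lbl == 0:
--             out_pred.append(0)
--         elif pred[i] == 0 and prev_lbl == 1 and next_lbl == 1:
--             out_pred.append(1)
--         else:
--             out_pred.append(pred[i])
--     return out_pred
-- ===== SOURCE B (Python) =====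
-- def smooth_predictions(pred):
--     # Compress pred into maximal runs (value, length), then emit each run,
--     # flipping only length-1 runs of 1 (resp. 0) whose both neighbor runs are 0 (resp. 1).
--     runs = []
--     i = 0
--     total = len(pred)
--     while i < total:
--         j = i + 1
--         while j < total and pred[j] == pred[i]:
--             j += 1
--         runs.append((pred[i], j - i))
--         i = j
--     out = []
--     left = None
--     for k in range(len(runs)):
--         v, n = runs[k]
--         right = runs[k + 1][0] if k + 1 < len(runs) else None
--         if n == 1 and v == 1 and left == 0 and right == 0:
--             out.append(0)
--         elif n == 1 and v == 0 and left == 1 and right == 1: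
--             out.append(1)
--         else:
--             out.extend([v] * n)
--         left = v
--     return out
-- ===== Notes on version B (the rewrite author's own statement) =====
-- stated objective: alternative
-- what changed: B first compresses pred into maximal (value,length) runs and then emits each run, flipping only length-1 runs of 1/0 whose both neighboring runs are 0/1, instead of A's index loop that re-reads pred[i-1], pred[i], pred[i+1] at every position.
import Mathlib
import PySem

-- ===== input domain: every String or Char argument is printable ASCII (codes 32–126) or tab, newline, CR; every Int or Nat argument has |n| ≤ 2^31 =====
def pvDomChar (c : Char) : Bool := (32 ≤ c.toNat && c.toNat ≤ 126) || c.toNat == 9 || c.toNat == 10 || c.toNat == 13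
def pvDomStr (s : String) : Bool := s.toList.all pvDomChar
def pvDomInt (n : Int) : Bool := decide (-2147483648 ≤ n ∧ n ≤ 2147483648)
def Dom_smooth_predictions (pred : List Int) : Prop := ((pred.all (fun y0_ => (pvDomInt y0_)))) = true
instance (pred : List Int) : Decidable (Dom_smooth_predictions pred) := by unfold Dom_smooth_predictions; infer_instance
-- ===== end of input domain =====

-- B replaces A's index loop by run-length compression plus a per-run emitter (alternative decomposition, same cost).

-- ===== PORT A =====
def smooth_predictions (pred : List Int) : List Int :=
  (PySem.List.pyRange 0 (pred.length : Int) 1).foldl (fun out i =>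
    let prev_lbl := if i > 0 then PySem.List.pyGetD pred (i - 1) 0 else -1
    let next_lbl := if i < (pred.length : Int) - 1 then PySem.List.pyGetD pred (i + 1) 0 else -1
    let cur := PySem.List.pyGetD pred i 0
    if cur = 1 ∧ prev_lbl = 0 ∧ next_lbl = 0 then out ++ [0]
    else if cur = 0 ∧ prev_lbl = 1 ∧ next_lbl = 1 then out ++ [1]
    else out ++ [cur]) []

-- ===== PORT B =====
-- maximal runs of equal values, as (value, length); Source B's inner i..j counting scan over the suffix is the takeWhile length, advancing i to j is the dropWhile
def pvRuns : List Int → List (Int × Nat)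
  | [] => []
  | x :: xs =>
      (x, (xs.takeWhile (· == x)).length + 1) :: pvRuns (xs.dropWhile (· == x))
termination_by xs => xs.length
decreasing_by
  exact Nat.lt_succ_of_le (List.length_dropWhile_le _ _)

-- walk of the run list carrying the left neighbor value and peeking at the right neighbor run
def pvEmit : Option Int → List (Int × Nat) → List Int
  | _, [] => []
  | left, (v, n) :: rest =>
      let right := rest.head?.map Prod.fst
      (if n = 1 ∧ v = 1 ∧ left = some 0 ∧ right = some 0 then [(0 : Int)]
       else if n = 1 ∧ v = 0 ∧ left = some 1 ∧ right = some 1 then [(1 : Int)]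
       else List.replicate n v) ++ pvEmit (some v) rest

def smooth_predictions_alt (pred : List Int) : List Int :=
  pvEmit none (pvRuns pred)

-- ===== PRECONDITION & SPEC =====
def Spec_smooth_predictions (pred : List Int) (out : List Int) : Prop := out = smooth_predictions_alt pred
instance (pred : List Int) (out : List Int) : Decidable (Spec_smooth_predictions pred out) := by unfold Spec_smooth_predictions; infer_instance

-- ===== CLAIM (what is proved, stated in full; the proofs are below) =====
def Claim_equal_smooth_predictions : Prop := ∀ (pred : List Int), Dom_smooth_predictions pred → Spec_smooth_predictions pred (smooth_predictions pred)

-- ===== LEMMAS AND PROOFS =====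

-- A's per-position rule as a function of (prev, cur, next)
def pvF (prev cur next : Int) : Int :=
  if cur = 1 ∧ prev = 0 ∧ next = 0 then 0
  else if cur = 0 ∧ prev = 1 ∧ next = 1 then 1
  else cur

-- structural form of A's loop: map each element through pvF with its actual neighbors
def pvMapA : Int → List Int → List Int
  | _, [] => []
  | prev, x :: xs => pvF prev x (xs.headD (-1)) :: pvMapA x xs

theorem pvF_self_right (p v : Int) : pvF p v v = v := by
  unfold pvF; split_ifs <;> omega

theorem pvF_self_left (v n : Int) : pvF v v n = v := by
  unfold pvF; split_ifs <;> omega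

theorem pvMapA_replicate (x : Int) (n : Nat) (d : List Int) :
    pvMapA x (List.replicate n x ++ d) = List.replicate n x ++ pvMapA x d := by
  induction n with
  | zero => simp
  | succ m ih =>
      simp only [List.replicate_succ, List.cons_append, pvMapA, ih, pvF_self_left]

theorem pvTakeWhile_replicate (x : Int) (xs : List Int) :
    xs.takeWhile (· == x) = List.replicate (xs.takeWhile (· == x)).length x := by
  induction xs with
  | nil => rfl
  | cons y ys ih =>
      by_cases h : y = x
      · subst h
        simp only [List.takeWhile_cons, beq_self_eq_true, if_true, List.length_cons,
          List.replicate_succ]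
        exact congrArg (y :: ·) ih
      · simp [h]

theorem pvRuns_head (d : List Int) : (pvRuns d).head?.map Prod.fst = d.head? := by
  cases d <;> rw [pvRuns] <;> rfl

-- the length-1-run case of pvEmit equals one application of pvF
theorem pvEmit_single (left : Option Int) (v : Int) (o : Option Int) :
    (if v = 1 ∧ left = some 0 ∧ o = some 0 then [(0 : Int)]
     else if v = 0 ∧ left = some 1 ∧ o = some 1 then [(1 : Int)]
     else List.replicate 1 v)
    = [pvF (left.getD (-1)) v (o.getD (-1))] := by
  cases left <;> cases o <;>
    simp only [Option.getD, Option.some.injEq, reduceCtorEq, and_false, false_and, true_and, if_false, List.replicate_one, pvF] <;>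
    split_ifs <;> simp_all

theorem pvEmit_runs_aux :
    ∀ (fuel : Nat) (xs : List Int), xs.length ≤ fuel →
      ∀ (left : Option Int), pvEmit left (pvRuns xs) = pvMapA (left.getD (-1)) xs := by
  intro fuel
  induction fuel with
  | zero =>
      intro xs h left
      have : xs = [] := List.eq_nil_of_length_eq_zero (Nat.le_zero.mp h)
      subst this
      simp [pvRuns, pvEmit, pvMapA]
  | succ m ih =>
      intro xs h left
      cases xs with
      | nil => simp [pvRuns, pvEmit, pvMapA]
      | cons x t =>
          rw [pvRuns]
          set tw := t.takeWhile (· == x) with htw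
          set dw := t.dropWhile (· == x) with hdw
          have htd : tw ++ dw = t := List.takeWhile_append_dropWhile
          have hrep : tw = List.replicate tw.length x := pvTakeWhile_replicate x t
          have hlen : dw.length ≤ m := by
            have hle := List.length_dropWhile_le (· == x) t
            rw [← hdw] at hle
            simp only [List.length_cons] at h
            omega
          have hih : pvEmit (some x) (pvRuns dw) = pvMapA x dw := by
            simpa using ih dw hlen (some x)
          rw [pvEmit]
          rw [pvRuns_head]
          cases htwc : tw with
          | nil =>
              have hdt : dw = t := by rw [← htd, htwc]; rfl
              rw [hih, hdt]
              simp only [List.length_nil, Nat.zero_add, true_and]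
              rw [pvEmit_single left x t.head?]
              cases t <;> simp [pvMapA]
          | cons y ys =>
              have hname : tw.length = ys.length + 1 := by rw [htwc]; simp
              have ht : t = List.replicate (ys.length + 1) x ++ dw := by
                conv_lhs => rw [← htd]
                rw [hrep, hname]
              rw [hih, ht]
              simp only [List.length_cons]
              split_ifs with h1 h2
              · exact absurd h1.1 (by omega)
              · exact absurd h2.1 (by omega)
              · simp only [pvMapA, List.replicate_succ, List.cons_append, List.headD_cons,
                  pvF_self_right, pvF_self_left, pvMapA_replicate]

theorem pvAlt_eq_mapA (pred : List Int) : smooth_predictions_alt pred = pvMapA (-1) pred := by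
  simpa using pvEmit_runs_aux pred.length pred le_rfl none

-- A's index loop, started at position j, appends exactly the structural map of the suffix
theorem pvLoopA_aux (pred : List Int) :
    ∀ (fuel j : Nat) (acc : List Int), pred.length - j ≤ fuel → j ≤ pred.length →
      (PySem.List.pyRange (j : Int) (pred.length : Int) 1).foldl (fun out i =>
        let prev_lbl := if i > 0 then PySem.List.pyGetD pred (i - 1) 0 else -1
        let next_lbl := if i < (pred.length : Int) - 1 then PySem.List.pyGetD pred (i + 1) 0 else -1
        let cur := PySem.List.pyGetD pred i 0
        if cur = 1 ∧ prev_lbl = 0 ∧ next_lbl = 0 then out ++ [0]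
        else if cur = 0 ∧ prev_lbl = 1 ∧ next_lbl = 1 then out ++ [1]
        else out ++ [cur]) acc
      = acc ++ pvMapA (if j = 0 then -1 else pred.getD (j - 1) 0) (pred.drop j) := by
  intro fuel
  induction fuel with
  | zero =>
      intro j acc hf hj
      have hj' : j = pred.length := by omega
      subst hj'
      rw [PySem.List.pyRange_one_eq_nil (le_refl _)]
      simp [pvMapA, List.drop_length]
  | succ m ih =>
      intro j acc hf hj
      rcases Nat.lt_or_ge j pred.length with hlt | hge
      · have hcast : ((j : Int) + 1) = ((j + 1 : Nat) : Int) := by push_cast; ring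
        have hcur : PySem.List.pyGetD pred (j : Int) 0 = pred.getD j 0 := by
          simp [PySem.List.pyGetD_natCast]
        have hprev : (if (j : Int) > 0 then PySem.List.pyGetD pred ((j : Int) - 1) 0 else -1)
            = (if j = 0 then -1 else pred.getD (j - 1) 0) := by
          rcases Nat.eq_zero_or_pos j with h0 | h0
          · subst h0; simp
          · rw [if_pos (by exact_mod_cast h0), if_neg (by omega)]
            have : ((j : Int) - 1) = ((j - 1 : Nat) : Int) := by omega
            rw [this, PySem.List.pyGetD_natCast]
        have hnext : (if (j : Int) < (pred.length : Int) - 1 then PySem.List.pyGetD pred ((j : Int) + 1) 0 else -1)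
            = (pred.drop (j + 1)).headD (-1) := by
          rcases Nat.lt_or_ge (j + 1) pred.length with h1 | h1
          · rw [if_pos (by exact_mod_cast (by omega : (j : Int) < (pred.length : Int) - 1))]
            rw [hcast, PySem.List.pyGetD_natCast]
            rw [List.drop_eq_getElem_cons h1]
            simp [List.getD_eq_getElem?_getD, List.getElem?_eq_getElem h1]
          · rw [if_neg (by omega)]
            rw [List.drop_eq_nil_of_le h1]
            rfl
        have hdrop : pred.drop j = pred.getD j 0 :: pred.drop (j + 1) := by
          rw [List.drop_eq_getElem_cons hlt]
          simp [List.getD_eq_getElem?_getD, List.getElem?_eq_getElem hlt]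
        have hj1 : (if j + 1 = 0 then (-1 : Int) else pred.getD (j + 1 - 1) 0) = pred.getD j 0 := by
          simp
        rw [PySem.List.pyRange_one_cons (by exact_mod_cast hlt)]
        rw [List.foldl_cons]
        simp only [hcur, hprev, hnext]
        rw [hcast, ih (j + 1) _ (by omega) (by omega), hj1, hdrop]
        simp only [pvMapA, pvF]
        split_ifs <;> simp [List.append_assoc]
      · have hj' : j = pred.length := by omega
        subst hj'
        rw [PySem.List.pyRange_one_eq_nil (le_refl _)]
        simp [pvMapA, List.drop_length]

theorem pvA_eq_mapA (pred : List Int) : smooth_predictions pred = pvMapA (-1) pred := by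
  have := pvLoopA_aux pred pred.length 0 [] (by omega) (by omega)
  simpa [smooth_predictions] using this

-- ===== VERDICT (by name: the statement is the Claim_ definition above) =====
theorem smooth_predictions_spec : Claim_equal_smooth_predictions := by
  intro pred _
  unfold Spec_smooth_predictions
  rw [pvA_eq_mapA, pvAlt_eq_mapA]
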